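-- pv_equiv track=rewrite | github.com/smohapatra1/scripting | python/practice/start_again/2023/11092023/naming_a_company.py | naming_company
-- ===== SOURCE A (Python) =====
-- from collections import defaultdict
-- from typing import List
--
-- def naming_company(ideas: List[str]) -> int:
--     names=defaultdict(set)
--     res=0
--     for i in ideas:
--         names[i[0]].add(i[1:])
--     arr=list(names.keys())
--     ans, n=0, len(arr)
--     for i in range(n):
--         for j in range(i+1, n ):
--             a= arr[i]
--             b=arr[j]
--             res +=len(names[a]-names[b])*len(names[b]-names[a])*2
--     return res
-- ===== SOURCE B (Python) =====
-- from typing import List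
--
-- def naming_company(ideas: List[str]) -> int:
--     # Group suffixes by first letter, and first letters by suffix.
--     groups = {}
--     suffixes = {}
--     for i in ideas:
--         groups.setdefault(i[0], set()).add(i[1:])
--         suffixes.setdefault(i[1:], set()).add(i[0])
--     # Suffix-driven pass: inter[(p, q)] = number of distinct suffixes shared
--     # by first letters p and q.
--     inter = {}
--     for letters in suffixes.values():
--         for p in letters:
--             for q in letters:
--                 if p != q:
--                     inter[(p, q)] = inter.get((p, q), 0) + 1
--     letter_list = list(groups)
--     n = len(letter_list)
--     total = 0
--     for x in range(n):
--         for y in range(x + 1, n):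
--             a, b = letter_list[x], letter_list[y]
--             ua = len(groups[a]) - inter.get((a, b), 0)
--             ub = len(groups[b]) - inter.get((b, a), 0)
--             total += ua * ub * 2
--     return total
-- ===== Notes on version B (the rewrite author's own statement) =====
-- stated objective: alternative
-- what changed: Replaces A's per-pair set differences with a suffix-driven pass that builds a shared-suffix intersection table once; each pair's contribution is then computed as (group size minus table entry) products instead of materialising set differences.
import Mathlib
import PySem

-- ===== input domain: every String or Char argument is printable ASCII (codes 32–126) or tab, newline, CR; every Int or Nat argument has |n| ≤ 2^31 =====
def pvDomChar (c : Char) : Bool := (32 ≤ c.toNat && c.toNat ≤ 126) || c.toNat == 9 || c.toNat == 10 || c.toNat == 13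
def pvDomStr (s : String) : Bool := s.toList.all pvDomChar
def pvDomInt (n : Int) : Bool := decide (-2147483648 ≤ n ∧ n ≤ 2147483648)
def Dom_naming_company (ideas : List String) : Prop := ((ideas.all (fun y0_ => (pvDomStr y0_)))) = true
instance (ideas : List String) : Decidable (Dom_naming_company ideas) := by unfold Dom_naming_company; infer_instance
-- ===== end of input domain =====

-- B replaces A's per-pair set differences by a suffix-driven shared-suffix table built once; a different decomposition of the same count (objective: alternative).

-- ===== PORT A =====
-- names[i[0]].add(i[1:]) on a defaultdict(set); the [] branch is unreachable under Pre_ (i[0] raises IndexError there)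
def pvStepA (d : PySem.Dict Char (PySem.Set String)) (i : String) : PySem.Dict Char (PySem.Set String) :=
  match i.toList with
  | [] => d
  | c :: rest => d.modify c PySem.Set.empty (fun s => PySem.Set.add s (String.ofList rest))

def naming_company (ideas : List String) : Int :=
  let names := ideas.foldl pvStepA PySem.Dict.empty
  let arr := names.keys
  let n : Int := arr.length
  (PySem.List.pyRange 0 n 1).foldl (fun res i =>
    (PySem.List.pyRange (i+1) n 1).foldl (fun res j =>
      let a := PySem.List.pyGetD arr i ' '
      let b := PySem.List.pyGetD arr j ' '
      res + PySem.Set.len (PySem.Set.diff (names.getD a PySem.Set.empty) (names.getD b PySem.Set.empty)) *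
            PySem.Set.len (PySem.Set.diff (names.getD b PySem.Set.empty) (names.getD a PySem.Set.empty)) * 2) res) 0

-- ===== PORT B =====
-- groups.setdefault(i[0], set()).add(i[1:]) ; the [] branch is unreachable under Pre_
def pvStepGroups (d : PySem.Dict Char (PySem.Set String)) (i : String) : PySem.Dict Char (PySem.Set String) :=
  match i.toList with
  | [] => d
  | c :: rest => d.modify c PySem.Set.empty (fun s => PySem.Set.add s (String.ofList rest))

-- suffixes.setdefault(i[1:], set()).add(i[0])
def pvStepSuffix (d : PySem.Dict String (PySem.Set Char)) (i : String) : PySem.Dict String (PySem.Set Char) :=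
  match i.toList with
  | [] => d
  | c :: rest => d.modify (String.ofList rest) PySem.Set.empty (fun s => PySem.Set.add s c)

-- for p in letters: for q in letters: if p != q: inter[(p,q)] = inter.get((p,q),0)+1
def pvInterStep (t : PySem.Dict (Char × Char) Int) (L : PySem.Set Char) : PySem.Dict (Char × Char) Int :=
  L.foldl (fun t1 p => L.foldl (fun t2 q => if p ≠ q then t2.modify (p, q) 0 (· + 1) else t2) t1) t

def naming_company_alt (ideas : List String) : Int :=
  let gs := ideas.foldl (fun gs i => (pvStepGroups gs.1 i, pvStepSuffix gs.2 i))
              ((PySem.Dict.empty : PySem.Dict Char (PySem.Set String)),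
               (PySem.Dict.empty : PySem.Dict String (PySem.Set Char)))
  let groups := gs.1
  let suffixes := gs.2
  let inter := suffixes.values.foldl pvInterStep PySem.Dict.empty
  let letters := groups.keys
  let n : Int := letters.length
  (PySem.List.pyRange 0 n 1).foldl (fun total x =>
    (PySem.List.pyRange (x+1) n 1).foldl (fun total y =>
      let a := PySem.List.pyGetD letters x ' '
      let b := PySem.List.pyGetD letters y ' '
      total + (PySem.Set.len (groups.getD a PySem.Set.empty) - inter.getD (a, b) 0) *
              (PySem.Set.len (groups.getD b PySem.Set.empty) - inter.getD (b, a) 0) * 2) total) 0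

-- ===== PRECONDITION & SPEC =====
-- Pre_ excludes lists containing the empty string, on which A raises IndexError at i[0].
def Pre_naming_company (ideas : List String) : Prop := ∀ i ∈ ideas, i ≠ ""
instance (ideas : List String) : Decidable (Pre_naming_company ideas) := by unfold Pre_naming_company; infer_instance
def pvWitness_naming_company : List String := ["ax", "bx", "by", "c"]

def Spec_naming_company (ideas : List String) (out : Int) : Prop := out = naming_company_alt ideas
instance (ideas : List String) (out : Int) : Decidable (Spec_naming_company ideas out) := by unfold Spec_naming_company; infer_instance

-- ===== CLAIM (what is proved, stated in full; the proofs are below) =====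
def Claim_equal_naming_company : Prop := ∀ (ideas : List String), Dom_naming_company ideas → Pre_naming_company ideas → Spec_naming_company ideas (naming_company ideas)

-- ===== LEMMAS AND PROOFS =====

-- the paired fold of B's single pass splits into the two independent folds
theorem pvFoldPair (ideas : List String) (g : PySem.Dict Char (PySem.Set String)) (s : PySem.Dict String (PySem.Set Char)) :
    ideas.foldl (fun gs i => (pvStepGroups gs.1 i, pvStepSuffix gs.2 i)) (g, s)
      = (ideas.foldl pvStepGroups g, ideas.foldl pvStepSuffix s) := by
  induction ideas generalizing g s with
  | nil => rfl
  | cons i tl ih => simpa using ih (pvStepGroups g i) (pvStepSuffix s i)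

theorem pvStepGroups_eq : pvStepGroups = pvStepA := rfl

theorem pvKeysNodupA (ideas : List String) (d : PySem.Dict Char (PySem.Set String)) (hd : d.keys.Nodup) :
    (ideas.foldl pvStepA d).keys.Nodup := by
  induction ideas generalizing d with
  | nil => exact hd
  | cons i tl ih =>
    cases h : i.toList with
    | nil => simpa [pvStepA, h] using ih d hd
    | cons c rest =>
      refine ih _ ?_
      rw [pvStepA, h, PySem.Dict.keys_modify]
      exact PySem.Dict.nodup_keys_insert _ _ _ hd

theorem pvKeysNodupS (ideas : List String) (d : PySem.Dict String (PySem.Set Char)) (hd : d.keys.Nodup) :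
    (ideas.foldl pvStepSuffix d).keys.Nodup := by
  induction ideas generalizing d with
  | nil => exact hd
  | cons i tl ih =>
    cases h : i.toList with
    | nil => simpa [pvStepSuffix, h] using ih d hd
    | cons c rest =>
      refine ih _ ?_
      rw [pvStepSuffix, h, PySem.Dict.keys_modify]
      exact PySem.Dict.nodup_keys_insert _ _ _ hd

theorem pvValsNodupA (ideas : List String) (d : PySem.Dict Char (PySem.Set String))
    (hd : ∀ a, (d.getD a PySem.Set.empty).Nodup) :
    ∀ a, ((ideas.foldl pvStepA d).getD a PySem.Set.empty).Nodup := by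
  induction ideas generalizing d with
  | nil => exact hd
  | cons i tl ih =>
    cases h : i.toList with
    | nil => simpa [pvStepA, h] using ih d hd
    | cons c rest =>
      refine ih _ ?_
      intro a
      rw [pvStepA, h, PySem.Dict.getD_modify]
      split_ifs
      · exact PySem.Set.nodup_add _ _ (hd c)
      · exact hd a

theorem pvValsNodupS (ideas : List String) (d : PySem.Dict String (PySem.Set Char))
    (hd : ∀ s, (d.getD s PySem.Set.empty).Nodup) :
    ∀ s, ((ideas.foldl pvStepSuffix d).getD s PySem.Set.empty).Nodup := by
  induction ideas generalizing d with
  | nil => exact hd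
  | cons i tl ih =>
    cases h : i.toList with
    | nil => simpa [pvStepSuffix, h] using ih d hd
    | cons c rest =>
      refine ih _ ?_
      intro s
      rw [pvStepSuffix, h, PySem.Dict.getD_modify]
      split_ifs
      · exact PySem.Set.nodup_add _ _ (hd (String.ofList rest))
      · exact hd s

-- the two indexes describe the same relation: suffix s is in letter a's group
-- iff letter a is in suffix s's letter set
theorem pvInv (ideas : List String) (dN : PySem.Dict Char (PySem.Set String)) (dS : PySem.Dict String (PySem.Set Char))
    (h : ∀ a s, s ∈ dN.getD a PySem.Set.empty ↔ a ∈ dS.getD s PySem.Set.empty) :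
    ∀ a s, s ∈ (ideas.foldl pvStepA dN).getD a PySem.Set.empty ↔ a ∈ (ideas.foldl pvStepSuffix dS).getD s PySem.Set.empty := by
  induction ideas generalizing dN dS with
  | nil => exact h
  | cons i tl ih =>
    cases hi : i.toList with
    | nil => simpa [pvStepA, pvStepSuffix, hi] using ih dN dS h
    | cons c rest =>
      simp only [List.foldl_cons, pvStepA, pvStepSuffix, hi]
      refine ih _ _ ?_
      intro a s
      rw [PySem.Dict.getD_modify, PySem.Dict.getD_modify]
      split_ifs with h1 h2 h2
      · subst h1 h2; simp [PySem.Set.mem_add]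
      · subst h1
        rw [PySem.Set.mem_add]
        simp only [h2, or_false]
        exact h a s
      · subst h2
        rw [PySem.Set.mem_add]
        simp only [h1, or_false]
        exact h a (String.ofList rest)
      · exact h a s

theorem pvMemKeysOf {κ ν : Type} [BEq κ] [LawfulBEq κ] (d : PySem.Dict κ (List ν)) (k : κ) (x : ν)
    (hx : x ∈ d.getD k []) : k ∈ d.keys := by
  by_cases hc : d.contains k = true
  · exact (PySem.Dict.contains_iff_mem_keys d k).1 hc
  · rw [PySem.Dict.getD_of_not_contains d [] (by simpa using hc)] at hx
    simp at hx

-- inner q-loop: with p fixed, the (a,b) entry gains 1 exactly when p = a and b occurs in L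
theorem pvInnerCount (p a b : Char) (hab : a ≠ b) :
    ∀ (L : List Char), L.Nodup → ∀ (t : PySem.Dict (Char × Char) Int),
    (L.foldl (fun t2 q => if p ≠ q then t2.modify (p, q) 0 (· + 1) else t2) t).getD (a, b) 0
      = t.getD (a, b) 0 + (if p = a ∧ b ∈ L then 1 else 0) := by
  intro L
  induction L with
  | nil => intro _ t; simp
  | cons q T ih =>
    intro hL t
    rcases List.nodup_cons.mp hL with ⟨hq, hT⟩
    rw [List.foldl_cons, ih hT]
    by_cases hpq : p = q
    · subst hpq
      rw [if_neg (by simp)]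
      have hiff : (p = a ∧ b ∈ (p :: T)) ↔ (p = a ∧ b ∈ T) := by
        constructor
        · rintro ⟨h1, h2⟩
          refine ⟨h1, ?_⟩
          rcases List.mem_cons.mp h2 with h3 | h3
          · exact absurd (h3.trans h1).symm hab
          · exact h3
        · rintro ⟨h1, h2⟩; exact ⟨h1, List.mem_cons_of_mem _ h2⟩
      rw [if_congr hiff rfl rfl]
    · rw [if_pos hpq, PySem.Dict.getD_modify]
      by_cases hk : (a, b) = (p, q)
      · have ha : a = p := congrArg Prod.fst hk
        have hb : b = q := congrArg Prod.snd hk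
        subst ha hb
        rw [if_pos rfl]
        simp [hq]
      · rw [if_neg hk]
        have hiff : (p = a ∧ b ∈ (q :: T)) ↔ (p = a ∧ b ∈ T) := by
          constructor
          · rintro ⟨h1, h2⟩
            refine ⟨h1, ?_⟩
            rcases List.mem_cons.mp h2 with h3 | h3
            · exact absurd (by rw [← h1, h3]) hk
            · exact h3
          · rintro ⟨h1, h2⟩; exact ⟨h1, List.mem_cons_of_mem _ h2⟩
        rw [if_congr hiff rfl rfl]

-- middle p-loop
theorem pvMidCount (L : List Char) (hL : L.Nodup) (a b : Char) (hab : a ≠ b) :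
    ∀ (P : List Char), P.Nodup → ∀ (t : PySem.Dict (Char × Char) Int),
    (P.foldl (fun t1 p => L.foldl (fun t2 q => if p ≠ q then t2.modify (p, q) 0 (· + 1) else t2) t1) t).getD (a, b) 0
      = t.getD (a, b) 0 + (if a ∈ P ∧ b ∈ L then 1 else 0) := by
  intro P
  induction P with
  | nil => intro _ t; simp
  | cons p T ih =>
    intro hP t
    rcases List.nodup_cons.mp hP with ⟨hp, hT⟩
    rw [List.foldl_cons, ih hT, pvInnerCount p a b hab L hL t]
    by_cases h1 : p = a
    · subst h1
      by_cases h2 : b ∈ L <;> simp [hp, h2]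
    · have h1' : ¬ a = p := fun he => h1 he.symm
      by_cases h3 : a ∈ T <;> by_cases h2 : b ∈ L <;> simp [h1, h1', h3, h2]

-- whole table: the (a,b) entry counts the suffix sets containing both a and b
theorem pvInterCount (a b : Char) (hab : a ≠ b) :
    ∀ (V : List (PySem.Set Char)), (∀ L ∈ V, L.Nodup) → ∀ (t : PySem.Dict (Char × Char) Int),
    (V.foldl pvInterStep t).getD (a, b) 0
      = t.getD (a, b) 0 + (V.countP (fun L => decide (a ∈ L ∧ b ∈ L)) : Int) := by
  intro V
  induction V with
  | nil => intro _ t; simp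
  | cons L V ih =>
    intro hV t
    rw [List.foldl_cons, ih (fun M hM => hV M (List.mem_cons_of_mem _ hM))]
    have hLn : L.Nodup := hV L List.mem_cons_self
    rw [pvInterStep, pvMidCount L hLn a b hab L hLn t, List.countP_cons]
    by_cases h : a ∈ L ∧ b ∈ L
    · simp [h]; ring
    · simp [h]

-- |S - T| = |S| - |S ∩ T| on the list level
theorem pvDiffLen (S T : PySem.Set String) :
    PySem.Set.len (PySem.Set.diff S T)
      = PySem.Set.len S - ((S.filter (fun s => decide (s ∈ T))).length : Int) := by
  have hp : (fun x => !(PySem.Set.contains T x)) = (fun x : String => !(decide (x ∈ T))) := by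
    funext x; simp [pysem]
  have key : (S.filter (fun x => !(decide (x ∈ T)))).length + (S.filter (fun s => decide (s ∈ T))).length = S.length := by
    rw [← List.countP_eq_length_filter, ← List.countP_eq_length_filter]
    have h := List.length_eq_countP_add_countP (fun s : String => decide (s ∈ T)) (l := S)
    have h2 : (fun a : String => decide (¬ (decide (a ∈ T)) = true)) = (fun x : String => !(decide (x ∈ T))) := by
      funext x; by_cases hh : x ∈ T <;> simp [hh]
    rw [h2] at h
    omega
  simp only [PySem.Set.diff, PySem.Set.len, hp]
  omega

-- per-pair bridge: A's set-difference size equals B's size-minus-table expression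
theorem pvPair (ideas : List String) (a b : Char) (hab : a ≠ b) :
    PySem.Set.len (PySem.Set.diff ((ideas.foldl pvStepA PySem.Dict.empty).getD a PySem.Set.empty)
                                  ((ideas.foldl pvStepA PySem.Dict.empty).getD b PySem.Set.empty))
      = PySem.Set.len ((ideas.foldl pvStepA PySem.Dict.empty).getD a PySem.Set.empty)
        - ((ideas.foldl pvStepSuffix PySem.Dict.empty).values.foldl pvInterStep PySem.Dict.empty).getD (a, b) 0 := by
  set N := ideas.foldl pvStepA (PySem.Dict.empty : PySem.Dict Char (PySem.Set String)) with hN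
  set S := ideas.foldl pvStepSuffix (PySem.Dict.empty : PySem.Dict String (PySem.Set Char)) with hS
  have hSk : S.keys.Nodup := pvKeysNodupS ideas _ PySem.Dict.nodup_keys_empty
  have hSv : ∀ s, (S.getD s PySem.Set.empty).Nodup := by
    refine pvValsNodupS ideas _ ?_
    intro s; rw [PySem.Dict.getD_empty]; exact List.nodup_nil
  have hNv : ∀ x, (N.getD x PySem.Set.empty).Nodup := by
    refine pvValsNodupA ideas _ ?_
    intro x; rw [PySem.Dict.getD_empty]; exact List.nodup_nil
  have hInv : ∀ x s, s ∈ N.getD x PySem.Set.empty ↔ x ∈ S.getD s PySem.Set.empty := by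
    refine pvInv ideas _ _ ?_
    intro x s; rw [PySem.Dict.getD_empty, PySem.Dict.getD_empty]
    simp [PySem.Set.empty]
  have hvals : S.values = S.keys.map (fun s => S.getD s PySem.Set.empty) :=
    PySem.Dict.values_eq_map_keys S hSk _
  have hVnodup : ∀ L ∈ S.values, L.Nodup := by
    rw [hvals]; intro L hL
    obtain ⟨s, _, rfl⟩ := List.mem_map.mp hL
    exact hSv s
  have hI : ((S.values).foldl pvInterStep PySem.Dict.empty).getD (a, b) 0
      = (S.values.countP (fun L => decide (a ∈ L ∧ b ∈ L)) : Int) := by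
    rw [pvInterCount a b hab S.values hVnodup _, PySem.Dict.getD_empty, zero_add]
  have hcount : S.values.countP (fun L => decide (a ∈ L ∧ b ∈ L))
      = ((N.getD a PySem.Set.empty).filter (fun s => decide (s ∈ N.getD b PySem.Set.empty))).length := by
    rw [hvals, List.countP_map, List.countP_eq_length_filter]
    apply List.Perm.length_eq
    rw [List.perm_ext_iff_of_nodup (hSk.filter _) ((hNv a).filter _)]
    intro s
    simp only [List.mem_filter, Function.comp, decide_eq_true_eq]
    constructor
    · rintro ⟨_, ha, hb⟩
      exact ⟨(hInv a s).2 ha, (hInv b s).2 hb⟩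
    · rintro ⟨ha, hb⟩
      exact ⟨pvMemKeysOf S s a ((hInv a s).1 ha), (hInv a s).1 ha, (hInv b s).1 hb⟩
  rw [pvDiffLen, hI, hcount]

-- ===== VERDICT (by name: the statement is the Claim_ definition above) =====
theorem naming_company_spec : Claim_equal_naming_company := by
  intro ideas _ _
  unfold Spec_naming_company
  simp only [naming_company, naming_company_alt, pvFoldPair]
  simp only [pvStepGroups_eq]
  have harr : (ideas.foldl pvStepA (PySem.Dict.empty : PySem.Dict Char (PySem.Set String))).keys.Nodup :=
    pvKeysNodupA ideas _ PySem.Dict.nodup_keys_empty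
  set arr := (ideas.foldl pvStepA (PySem.Dict.empty : PySem.Dict Char (PySem.Set String))).keys with harrdef
  apply PySem.List.foldl_congr_mem
  intro acc i hi
  apply PySem.List.foldl_congr_mem
  intro acc2 j hj
  obtain ⟨hi0, hi1⟩ := PySem.List.mem_pyRange_one.mp hi
  obtain ⟨hj0, hj1⟩ := PySem.List.mem_pyRange_one.mp hj
  rw [PySem.List.pyGetD_eq_getElem arr ' ' hi0 hi1,
      PySem.List.pyGetD_eq_getElem arr ' ' (by omega) hj1]
  have hne : arr[i.toNat]'(by omega) ≠ arr[j.toNat]'(by omega) := by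
    intro he
    have := harr.getElem_inj_iff.mp he
    omega
  rw [pvPair ideas _ _ hne, pvPair ideas _ _ hne.symm]
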